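-- pv_equiv track=rewrite | github.com/idansherman/final_project | tasks/task_5.py | extract_contexts
-- ===== SOURCE A (Python) =====
-- from collections import defaultdict
--
-- def extract_contexts(sentences, people, k):
--     """
--     Extracts k-sequence contexts for each person mentioned in the sentences.
--     Uses efficient indexing and k-sequence extraction.
--
--     :param sentences: List of tokenized sentences.
--     :param people: List of processed people names.
--     :param k: Maximum number of words in the sequence.
--     :return: Dictionary mapping person names to their k-sequences.
--     """
--
--     person_contexts = defaultdict(set)  # Dictionary to store results
--
--     # Step 1: Build a lookup dictionary for fast sentence retrieval
--     word_to_sentences = defaultdict(set)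
--     for idx, sentence in enumerate(sentences):
--         for word in set(sentence):  # Avoid duplicate entries for the same sentence
--             word_to_sentences[word].add(idx)
--
--     # Step 2: Extract Contexts Using Name Variants
--     for person_variants in people:
--         main_name = " ".join(person_variants[0])  # Full name as a single string
--         name_variants = {main_name}  # Start with the full name
--
--         # Add each individual word from the main name
--         name_variants.update(person_variants[0])  # Adds words like "harry" and "potter"
--
--         # Add full nicknames (do NOT break them apart)
--         name_variants.update(" ".join(nick) for nick in person_variants[1])
--
--         matched_sentences = set()
--         for name in name_variants:
--             for word in name.split():  # Allow partial name matches
--                 if word in word_to_sentences: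
--                     matched_sentences.update(word_to_sentences[word])  # Ensure we collect all relevant sentences
--
--         # Extract k-sequence contexts
--         for sentence_idx in matched_sentences:
--             sentence = sentences[sentence_idx]
--             for i in range(len(sentence)):
--                 if any(name_variant in " ".join(sentence) for name_variant in name_variants):
--                     # Generate k-word sequences up to max_k
--                     for seq_len in range(1, k + 1):  # Ensure we do not exceed max_k
--                         if i + seq_len <= len(sentence):
--                             context = " ".join(sentence[i : i + seq_len])
--                             person_contexts[main_name].add(context)  # Store in set to avoid duplicates
--
--     # Step 3: Convert Sets to Sorted Lists & Ensure Empty Names Are Removed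
--     formatted_output = {
--         person: sorted(person_contexts[person])  # Sort sequences alphabetically
--         for person in sorted(person_contexts.keys())  # Sort names lexicographically
--         if person_contexts[person]  # Ensure we remove empty names
--     }
--
--     return formatted_output
-- ===== SOURCE B (Python) =====
-- def extract_contexts(sentences, people, k):
--     """Same contexts as the original, but scanning sentences directly (no inverted
--     word->sentences index) and capping the sequence-length loop at the sentence end."""
--     person_contexts = {}
--     for person_variants in people:
--         main_name = " ".join(person_variants[0])
--         name_variants = {main_name}
--         name_variants.update(person_variants[0])
--         name_variants.update(" ".join(nick) for nick in person_variants[1])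
--         variant_words = {word for name in name_variants for word in name.split()}
--         contexts = person_contexts.get(main_name, set())
--         for sentence in sentences:
--             if variant_words.isdisjoint(sentence):
--                 continue
--             joined = " ".join(sentence)
--             if not any(v in joined for v in name_variants):
--                 continue
--             n = len(sentence)
--             for i in range(n):
--                 top = min(n, i + k)
--                 for j in range(i + 1, top + 1):
--                     contexts.add(" ".join(sentence[i:j]))
--         person_contexts[main_name] = contexts
--     return {
--         person: sorted(person_contexts[person])
--         for person in sorted(person_contexts)
--         if person_contexts[person]
--     }
-- ===== Notes on version B (the rewrite author's own statement) =====
-- stated objective: simpler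
-- what changed: B removes the word-to-sentences inverted index (Step 1) and scans sentences directly per person, testing the exact-token match with a variant-word set and the substring match on the joined sentence once per sentence, and caps the sequence-length loop at the sentence end instead of iterating to k.
import Mathlib
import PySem

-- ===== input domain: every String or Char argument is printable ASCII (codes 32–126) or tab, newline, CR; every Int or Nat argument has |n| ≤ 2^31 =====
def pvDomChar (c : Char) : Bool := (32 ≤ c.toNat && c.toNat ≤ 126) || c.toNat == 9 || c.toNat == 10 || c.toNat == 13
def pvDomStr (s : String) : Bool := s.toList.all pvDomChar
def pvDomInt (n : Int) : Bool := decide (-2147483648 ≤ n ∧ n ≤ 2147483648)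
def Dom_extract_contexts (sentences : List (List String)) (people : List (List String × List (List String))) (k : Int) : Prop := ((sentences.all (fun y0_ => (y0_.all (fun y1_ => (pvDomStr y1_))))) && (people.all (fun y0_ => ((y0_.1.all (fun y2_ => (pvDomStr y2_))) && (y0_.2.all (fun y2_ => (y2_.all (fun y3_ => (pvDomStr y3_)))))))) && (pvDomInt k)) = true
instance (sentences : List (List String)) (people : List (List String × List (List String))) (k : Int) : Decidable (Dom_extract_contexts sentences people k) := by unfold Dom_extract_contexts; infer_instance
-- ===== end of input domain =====

-- B drops A's word→sentences inverted index, scanning sentences directly per person and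
-- capping the sequence-length loop at the sentence end; objective: simpler.



-- ===== PORT A =====

-- name_variants: {main_name} ∪ words of the main name ∪ joined nicknames (identical code in A and B)
def pvVariants (pv : List String × List (List String)) : PySem.Set String :=
  PySem.Set.update
    (PySem.Set.update (PySem.Set.add PySem.Set.empty (PySem.Str.join " " pv.1)) pv.1)
    (pv.2.map (fun nick => PySem.Str.join " " nick))

-- Step 1: word → set of indices of the sentences containing it (as a token)
def pvWts (sentences : List (List String)) : PySem.Dict String (PySem.Set Int) :=
  (PySem.List.enumerate sentences 0).foldl
    (fun d p => (PySem.Set.ofList p.2).foldl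
      (fun d word => d.modify word [] (fun s => PySem.Set.add s p.1)) d)
    PySem.Dict.empty

def pvMatched (wts : PySem.Dict String (PySem.Set Int)) (nv : PySem.Set String) : PySem.Set Int :=
  nv.foldl (fun ms name =>
    (PySem.Str.split₀ name).foldl (fun ms word =>
      if wts.contains word then PySem.Set.update ms (wts.getD word []) else ms) ms)
    PySem.Set.empty

-- the two nested k-sequence loops of A over one matched sentence
def pvAddSeqsA (k : Int) (m : String) (nv : PySem.Set String) (sentence : List String)
    (pc : PySem.Dict String (PySem.Set String)) : PySem.Dict String (PySem.Set String) :=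
  (PySem.List.pyRange 0 (sentence.length : Int) 1).foldl (fun pc i =>
    if nv.any (fun v => PySem.Str.isIn v (PySem.Str.join " " sentence)) then
      (PySem.List.pyRange 1 (k + 1) 1).foldl (fun pc seq_len =>
        if i + seq_len ≤ (sentence.length : Int) then
          pc.modify m [] (fun s =>
            PySem.Set.add s (PySem.Str.join " " (PySem.List.slice sentence (some i) (some (i + seq_len)))))
        else pc) pc
    else pc) pc

-- A's body of `for person_variants in people`
def pvStepA (sentences : List (List String)) (k : Int) (wts : PySem.Dict String (PySem.Set Int))
    (pc : PySem.Dict String (PySem.Set String)) (pv : List String × List (List String)) :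
    PySem.Dict String (PySem.Set String) :=
  (pvMatched wts (pvVariants pv)).foldl (fun pc sidx =>
    -- sentences[sentence_idx]: indices come from enumerate, always in range
    pvAddSeqsA k (PySem.Str.join " " pv.1) (pvVariants pv) (PySem.List.pyGetD sentences sidx []) pc) pc

-- Step 3 (identical text in A and in B): sorted keys, sorted values, drop empties
def pvFormat (pc : PySem.Dict String (PySem.Set String)) : List (String × List String) :=
  ((PySem.List.sorted pc.keys (fun x => x) false).filter
      (fun person => !(pc.getD person []).isEmpty)).map
    (fun person => (person, PySem.List.sorted (pc.getD person []) (fun x => x) false))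

def extract_contexts (sentences : List (List String)) (people : List (List String × List (List String))) (k : Int) : List (String × List String) :=
  pvFormat (people.foldl (pvStepA sentences k (pvWts sentences)) PySem.Dict.empty)

-- ===== PORT B =====

-- variant_words = {word for name in name_variants for word in name.split()}
def pvWords (nv : PySem.Set String) : PySem.Set String :=
  nv.foldl (fun vs name => PySem.Set.update vs (PySem.Str.split₀ name)) PySem.Set.empty

-- B's capped double loop: all joins of sentence[i:j], i < j ≤ min(n, i+k)
def pvAddSeqsB (k : Int) (sentence : List String) (cs : PySem.Set String) : PySem.Set String :=
  (List.range sentence.length).foldl (fun cs (i : Nat) =>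
    (PySem.List.pyRange ((i : Int) + 1) (min (sentence.length : Int) ((i : Int) + k) + 1) 1).foldl
      (fun cs j => PySem.Set.add cs (PySem.Str.join " " (PySem.List.slice sentence (some (i : Int)) (some j)))) cs) cs

-- B's body of `for person_variants in people`: scan the sentences directly
def pvStepB (sentences : List (List String)) (k : Int)
    (pc : PySem.Dict String (PySem.Set String)) (pv : List String × List (List String)) :
    PySem.Dict String (PySem.Set String) :=
  pc.insert (PySem.Str.join " " pv.1)
    (sentences.foldl (fun cs sentence =>
      if PySem.Set.isdisjoint (pvWords (pvVariants pv)) sentence then cs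
      else if !((pvVariants pv).any (fun v => PySem.Str.isIn v (PySem.Str.join " " sentence))) then cs
      else pvAddSeqsB k sentence cs)
      (pc.getD (PySem.Str.join " " pv.1) []))

def extract_contexts_alt (sentences : List (List String)) (people : List (List String × List (List String))) (k : Int) : List (String × List String) :=
  pvFormat (people.foldl (pvStepB sentences k) PySem.Dict.empty)

-- ===== PRECONDITION & SPEC =====
def Spec_extract_contexts (sentences : List (List String)) (people : List (List String × List (List String))) (k : Int) (out : List (String × List String)) : Prop := out = extract_contexts_alt sentences people k
instance (sentences : List (List String)) (people : List (List String × List (List String))) (k : Int) (out : List (String × List String)) : Decidable (Spec_extract_contexts sentences people k out) := by unfold Spec_extract_contexts; infer_instance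

-- ===== CLAIM (what is proved, stated in full; the proofs are below) =====
def Claim_equal_extract_contexts : Prop := ∀ (sentences : List (List String)) (people : List (List String × List (List String))) (k : Int), Dom_extract_contexts sentences people k → Spec_extract_contexts sentences people k (extract_contexts sentences people k)

-- ===== LEMMAS AND PROOFS =====

theorem pvDictFoldMem {ι κ α : Type} [BEq κ] [LawfulBEq κ]
    (L : List ι) (F : PySem.Dict κ (List α) → ι → PySem.Dict κ (List α)) (Q : ι → κ → α → Prop)
    (hF : ∀ d i p x, x ∈ (F d i).getD p [] ↔ x ∈ d.getD p [] ∨ Q i p x) :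
    ∀ d p x, x ∈ (L.foldl F d).getD p [] ↔ x ∈ d.getD p [] ∨ ∃ i ∈ L, Q i p x := by
  induction L with
  | nil => simp
  | cons a t ih =>
    intro d p x
    simp only [List.foldl_cons, ih, hF, List.mem_cons]
    constructor
    · rintro ((h | h) | ⟨i, hi, h⟩)
      · exact Or.inl h
      · exact Or.inr ⟨a, Or.inl rfl, h⟩
      · exact Or.inr ⟨i, Or.inr hi, h⟩
    · rintro (h | ⟨i, (rfl | hi), h⟩)
      · exact Or.inl (Or.inl h)
      · exact Or.inl (Or.inr h)
      · exact Or.inr ⟨i, hi, h⟩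

theorem pvSetFoldMem {ι α : Type} (L : List ι) (F : List α → ι → List α) (Q : ι → α → Prop)
    (hF : ∀ s i x, x ∈ F s i ↔ x ∈ s ∨ Q i x) :
    ∀ s x, x ∈ L.foldl F s ↔ x ∈ s ∨ ∃ i ∈ L, Q i x := by
  induction L with
  | nil => simp
  | cons a t ih =>
    intro s x
    simp only [List.foldl_cons, ih, hF, List.mem_cons]
    constructor
    · rintro ((h | h) | ⟨i, hi, h⟩)
      · exact Or.inl h
      · exact Or.inr ⟨a, Or.inl rfl, h⟩
      · exact Or.inr ⟨i, Or.inr hi, h⟩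
    · rintro (h | ⟨i, (rfl | hi), h⟩)
      · exact Or.inl (Or.inl h)
      · exact Or.inl (Or.inr h)
      · exact Or.inr ⟨i, hi, h⟩

theorem pvFoldPres {ι σ : Type} (L : List ι) (P : σ → Prop) (F : σ → ι → σ)
    (h : ∀ s i, P s → P (F s i)) : ∀ s, P s → P (L.foldl F s) := by
  induction L with
  | nil => exact fun s hs => hs
  | cons a t ih => exact fun s hs => ih _ (h s a hs)

theorem pvModifyAdd_mem {κ α : Type} [BEq κ] [LawfulBEq κ] [DecidableEq κ] [BEq α] [LawfulBEq α]
    (d : PySem.Dict κ (List α)) (word p : κ) (v x : α) :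
    x ∈ (d.modify word [] (fun s => PySem.Set.add s v)).getD p [] ↔
      x ∈ d.getD p [] ∨ (p = word ∧ x = v) := by
  rw [PySem.Dict.getD_modify]
  split_ifs with h
  · subst h; simp [PySem.Set.mem_add]
  · tauto

theorem pvWts_mem (sentences : List (List String)) (w : String) (idx : Int) :
    idx ∈ (pvWts sentences).getD w [] ↔
      ∃ j : Nat, ∃ h : j < sentences.length, idx = (j : Int) ∧ w ∈ sentences[j] := by
  unfold pvWts
  rw [pvDictFoldMem _ _ (fun pr p x => p ∈ pr.2 ∧ x = pr.1) ?_]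
  · simp only [PySem.Dict.getD_empty, List.not_mem_nil, false_or]
    constructor
    · rintro ⟨pr, hpr, hw, hv⟩
      rcases (PySem.List.mem_enumerate_iff _ _ _).1 hpr with ⟨j, hj, rfl⟩
      exact ⟨j, hj, by simpa using hv, by simpa using hw⟩
    · rintro ⟨j, hj, rfl, hw⟩
      exact ⟨((j : Int), sentences[j]), (PySem.List.mem_enumerate_iff _ _ _).2 ⟨j, hj, by simp⟩, hw, rfl⟩
  · intro d pr p x
    rw [pvDictFoldMem _ _ (fun word p x => p = word ∧ x = pr.1) ?_]
    · simp only [PySem.Set.mem_ofList]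
      aesop
    · intro d word p x
      exact pvModifyAdd_mem d word p pr.1 x


def pvTok (nv : PySem.Set String) (s : List String) : Prop :=
  ∃ name ∈ nv, ∃ w ∈ PySem.Str.split₀ name, w ∈ s

def pvSub (nv : PySem.Set String) (s : List String) : Bool :=
  nv.any (fun v => PySem.Str.isIn v (PySem.Str.join " " s))

def pvSeq (k : Int) (s : List String) (x : String) : Prop :=
  ∃ i l : Nat, i + l ≤ s.length ∧ 1 ≤ l ∧ (l : Int) ≤ k ∧
    x = PySem.Str.join " " ((s.drop i).take l)

theorem pvMatched_mem (sentences : List (List String)) (nv : PySem.Set String) (idx : Int) :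
    idx ∈ pvMatched (pvWts sentences) nv ↔
      ∃ j : Nat, ∃ h : j < sentences.length, idx = (j : Int) ∧ pvTok nv sentences[j] := by
  unfold pvMatched
  rw [pvSetFoldMem _ _ (fun name x => ∃ w ∈ PySem.Str.split₀ name, x ∈ (pvWts sentences).getD w []) ?_]
  · simp only [PySem.Set.empty, List.not_mem_nil, false_or]
    constructor
    · rintro ⟨name, hn, w, hw, hx⟩
      rcases (pvWts_mem sentences w idx).1 hx with ⟨j, hj, rfl, hmem⟩
      exact ⟨j, hj, rfl, name, hn, w, hw, hmem⟩
    · rintro ⟨j, hj, rfl, name, hn, w, hw, hmem⟩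
      exact ⟨name, hn, w, hw, (pvWts_mem sentences w _).2 ⟨j, hj, rfl, hmem⟩⟩
  · intro ms name x
    rw [pvSetFoldMem _ _ (fun w x => x ∈ (pvWts sentences).getD w []) ?_]
    intro ms w x
    by_cases hc : (pvWts sentences).contains w
    · simp [hc, PySem.Set.mem_update]
    · simp only [hc, if_false, Bool.false_eq_true]
      rw [PySem.Dict.getD_of_not_contains _ _ (by simpa using hc)]
      simp

theorem pvWords_mem (nv : PySem.Set String) (w : String) :
    w ∈ pvWords nv ↔ ∃ name ∈ nv, w ∈ PySem.Str.split₀ name := by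
  unfold pvWords
  rw [pvSetFoldMem _ _ (fun name x => x ∈ PySem.Str.split₀ name) ?_]
  · simp [PySem.Set.empty]
  · intro s name x
    simp [PySem.Set.mem_update]

theorem pvAddSeqsA_mem (k : Int) (m : String) (nv : PySem.Set String) (s : List String)
    (pc : PySem.Dict String (PySem.Set String)) (p : String) (x : String) :
    x ∈ (pvAddSeqsA k m nv s pc).getD p [] ↔
      x ∈ pc.getD p [] ∨ (p = m ∧ pvSub nv s = true ∧ pvSeq k s x) := by
  unfold pvAddSeqsA
  by_cases hs : nv.any (fun v => PySem.Str.isIn v (PySem.Str.join " " s)) = true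
  · simp only [hs, if_true]
    rw [pvDictFoldMem _ _ (fun i p x => p = m ∧ ∃ l ∈ PySem.List.pyRange 1 (k+1) 1,
        i + l ≤ (s.length : Int) ∧ x = PySem.Str.join " " (PySem.List.slice s (some i) (some (i + l)))) ?_]
    · have hsub : pvSub nv s = true := by simpa [pvSub] using hs
      constructor
      · rintro (h | ⟨i, hi, rfl, l, hl, hle, rfl⟩)
        · exact Or.inl h
        · refine Or.inr ⟨rfl, hsub, ?_⟩
          rw [PySem.List.mem_pyRange_one] at hi hl
          lift i to ℕ using hi.1 with i'
          lift l to ℕ using (by omega : (0:Int) ≤ l) with l'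
          refine ⟨i', l', by exact_mod_cast hle, by exact_mod_cast hl.1, by omega, ?_⟩
          rw [show ((i' : Int) + (l' : Int)) = ((i' + l' : ℕ) : Int) by push_cast; ring,
            PySem.List.slice_natCast, show i' + l' - i' = l' from by omega]
      · rintro (h | ⟨rfl, -, i', l', hle, h1, hk, rfl⟩)
        · exact Or.inl h
        · refine Or.inr ⟨(i' : Int), ?_, rfl, (l' : Int), ?_, by exact_mod_cast hle, ?_⟩
          · rw [PySem.List.mem_pyRange_one]
            exact ⟨by positivity, by exact_mod_cast (by omega : i' < s.length)⟩
          · rw [PySem.List.mem_pyRange_one]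
            exact ⟨by exact_mod_cast h1, by omega⟩
          · rw [show ((i' : Int) + (l' : Int)) = ((i' + l' : ℕ) : Int) by push_cast; ring,
              PySem.List.slice_natCast, show i' + l' - i' = l' from by omega]
    · intro pc i p x
      rw [pvDictFoldMem _ _ (fun l p x => p = m ∧ i + l ≤ (s.length : Int) ∧
          x = PySem.Str.join " " (PySem.List.slice s (some i) (some (i + l)))) ?_]
      · constructor
        · rintro (h | ⟨l, hl, rfl, hle, rfl⟩)
          · exact Or.inl h
          · exact Or.inr ⟨rfl, l, hl, hle, rfl⟩
        · rintro (h | ⟨rfl, l, hl, hle, rfl⟩)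
          · exact Or.inl h
          · exact Or.inr ⟨l, hl, rfl, hle, rfl⟩
      · intro pc l p x
        by_cases hle : i + l ≤ (s.length : Int)
        · simp only [hle, if_true]
          rw [pvModifyAdd_mem]
          tauto
        · simp only [hle, if_false]
          tauto
  · have hb : nv.any (fun v => PySem.Str.isIn v (PySem.Str.join " " s)) = false := by
      simpa using hs
    simp only [hb, Bool.false_eq_true, if_false]
    have hfix : ∀ (L : List Int) (pc' : PySem.Dict String (PySem.Set String)),
        L.foldl (fun pc _ => pc) pc' = pc' := by
      intro L
      induction L with
      | nil => intro pc'; rfl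
      | cons a t ih => intro pc'; simp only [List.foldl_cons]; exact ih pc'
    rw [hfix]
    have hs' : pvSub nv s ≠ true := by simpa [pvSub] using hs
    tauto

theorem pvAddSeqsB_mem (k : Int) (s : List String) (cs : PySem.Set String) (x : String) :
    x ∈ pvAddSeqsB k s cs ↔ x ∈ cs ∨ pvSeq k s x := by
  unfold pvAddSeqsB
  rw [pvSetFoldMem _ _ (fun (i : Nat) x => ∃ j ∈ PySem.List.pyRange ((i : Int) + 1) (min (s.length : Int) ((i : Int) + k) + 1) 1,
      x = PySem.Str.join " " (PySem.List.slice s (some (i : Int)) (some j))) ?_]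
  · constructor
    · rintro (h | ⟨i, hi, j, hj, rfl⟩)
      · exact Or.inl h
      · refine Or.inr ?_
        rw [PySem.List.mem_pyRange_one] at hj
        rw [List.mem_range] at hi
        have h0 : (0 : Int) ≤ j - i := by omega
        refine ⟨i, (j - (i : Int)).toNat, by omega, by omega, by omega, ?_⟩
        rw [show j = (i : Int) + ((j - (i : Int)).toNat : Int) by omega,
          PySem.List.slice_natCast_add]
        congr 2
        omega
    · rintro (h | ⟨i, l, hle, h1, hk, rfl⟩)
      · exact Or.inl h
      · refine Or.inr ⟨i, List.mem_range.2 (by omega), ((i + l : ℕ) : Int), ?_, ?_⟩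
        · rw [PySem.List.mem_pyRange_one]
          constructor
          · push_cast; omega
          · have : ((i + l : ℕ) : Int) ≤ min (s.length : Int) ((i : Int) + k) := by
              push_cast
              omega
            omega
        · rw [show ((i + l : ℕ) : Int) = (i : Int) + (l : Int) by push_cast; ring,
            PySem.List.slice_natCast_add]
  · intro cs i x
    rw [pvSetFoldMem _ _ (fun (j : Int) x => x = PySem.Str.join " " (PySem.List.slice s (some (i : Int)) (some j))) ?_]
    intro cs j x
    rw [PySem.Set.mem_add]

theorem pvStepA_mem (sentences : List (List String)) (k : Int)
    (pc : PySem.Dict String (PySem.Set String)) (pv : List String × List (List String)) (p x : String) :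
    x ∈ (pvStepA sentences k (pvWts sentences) pc pv).getD p [] ↔
      x ∈ pc.getD p [] ∨ (p = PySem.Str.join " " pv.1 ∧
        ∃ j : Nat, ∃ h : j < sentences.length,
          pvTok (pvVariants pv) sentences[j] ∧ pvSub (pvVariants pv) sentences[j] = true ∧
          pvSeq k sentences[j] x) := by
  unfold pvStepA
  rw [pvDictFoldMem _ _ (fun sidx p x => p = PySem.Str.join " " pv.1 ∧
      pvSub (pvVariants pv) (PySem.List.pyGetD sentences sidx []) = true ∧
      pvSeq k (PySem.List.pyGetD sentences sidx []) x) ?_]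
  · constructor
    · rintro (h | ⟨sidx, hms, rfl, hsub, hseq⟩)
      · exact Or.inl h
      · rcases (pvMatched_mem sentences _ sidx).1 hms with ⟨j, hj, rfl, htok⟩
        have hget : PySem.List.pyGetD sentences ((j : Nat) : Int) [] = sentences[j] := by
          rw [PySem.List.pyGetD_natCast]
          simp [List.getD, List.getElem?_eq_getElem hj]
        rw [hget] at hsub hseq
        exact Or.inr ⟨rfl, j, hj, htok, hsub, hseq⟩
    · rintro (h | ⟨rfl, j, hj, htok, hsub, hseq⟩)
      · exact Or.inl h
      · refine Or.inr ⟨(j : Int), (pvMatched_mem sentences _ _).2 ⟨j, hj, rfl, htok⟩, rfl, ?_⟩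
        have hget : PySem.List.pyGetD sentences ((j : Nat) : Int) [] = sentences[j] := by
          rw [PySem.List.pyGetD_natCast]
          simp [List.getD, List.getElem?_eq_getElem hj]
        rw [hget]
        exact ⟨hsub, hseq⟩
  · intro pc sidx p x
    exact pvAddSeqsA_mem k _ _ _ pc p x

theorem pvStepB_mem (sentences : List (List String)) (k : Int)
    (pc : PySem.Dict String (PySem.Set String)) (pv : List String × List (List String)) (p x : String) :
    x ∈ (pvStepB sentences k pc pv).getD p [] ↔
      x ∈ pc.getD p [] ∨ (p = PySem.Str.join " " pv.1 ∧
        ∃ j : Nat, ∃ h : j < sentences.length,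
          pvTok (pvVariants pv) sentences[j] ∧ pvSub (pvVariants pv) sentences[j] = true ∧
          pvSeq k sentences[j] x) := by
  unfold pvStepB
  rw [PySem.Dict.getD_insert]
  have hctx : ∀ cs0 y, y ∈ sentences.foldl (fun cs sentence =>
      if PySem.Set.isdisjoint (pvWords (pvVariants pv)) sentence then cs
      else if !((pvVariants pv).any (fun v => PySem.Str.isIn v (PySem.Str.join " " sentence))) then cs
      else pvAddSeqsB k sentence cs) cs0 ↔
      y ∈ cs0 ∨ ∃ s ∈ sentences, pvTok (pvVariants pv) s ∧ pvSub (pvVariants pv) s = true ∧ pvSeq k s y := by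
    intro cs0 y
    rw [pvSetFoldMem _ _ (fun s y => pvTok (pvVariants pv) s ∧ pvSub (pvVariants pv) s = true ∧ pvSeq k s y) ?_]
    intro cs s y
    by_cases hd : PySem.Set.isdisjoint (pvWords (pvVariants pv)) s = true
    · have hnt : ¬ pvTok (pvVariants pv) s := by
        rw [PySem.Set.isdisjoint_iff] at hd
        rintro ⟨name, hn, w, hw, hws⟩
        exact hd w ((pvWords_mem _ w).2 ⟨name, hn, hw⟩) hws
      simp only [hd, if_true]
      tauto
    · have hd' : PySem.Set.isdisjoint (pvWords (pvVariants pv)) s = false :=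
        Bool.eq_false_iff.mpr hd
      have htok : pvTok (pvVariants pv) s := by
        have hne : ¬ ∀ w ∈ pvWords (pvVariants pv), w ∉ s :=
          fun hall => hd ((PySem.Set.isdisjoint_iff _ _).2 hall)
        push Not at hne
        rcases hne with ⟨w, hwv, hws⟩
        rcases (pvWords_mem _ w).1 hwv with ⟨name, hn, hw⟩
        exact ⟨name, hn, w, hw, hws⟩
      simp only [hd', Bool.false_eq_true, if_false]
      by_cases ha : (pvVariants pv).any (fun v => PySem.Str.isIn v (PySem.Str.join " " s)) = true
      · have hnot : (!(pvVariants pv).any (fun v => PySem.Str.isIn v (PySem.Str.join " " s))) = false := by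
          rw [ha]; rfl
        simp only [hnot, Bool.false_eq_true, if_false]
        rw [pvAddSeqsB_mem]
        have hsub : pvSub (pvVariants pv) s = true := ha
        tauto
      · have ha' : (pvVariants pv).any (fun v => PySem.Str.isIn v (PySem.Str.join " " s)) = false :=
          Bool.eq_false_iff.mpr ha
        have hnot : (!(pvVariants pv).any (fun v => PySem.Str.isIn v (PySem.Str.join " " s))) = true := by
          rw [ha']; rfl
        simp only [hnot, if_true]
        have hsub : ¬ pvSub (pvVariants pv) s = true := ha
        tauto
  by_cases hp : p = PySem.Str.join " " pv.1
  · subst hp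
    rw [if_pos rfl, hctx]
    constructor
    · rintro (h | ⟨s, hsmem, hs⟩)
      · exact Or.inl h
      · rcases List.mem_iff_getElem.1 hsmem with ⟨j, hj, rfl⟩
        exact Or.inr ⟨rfl, j, hj, hs.1, hs.2.1, hs.2.2⟩
    · rintro (h | ⟨-, j, hj, h1, h2, h3⟩)
      · exact Or.inl h
      · exact Or.inr ⟨sentences[j], List.getElem_mem hj, h1, h2, h3⟩
  · simp only [if_neg hp]
    tauto

def pvInv (pc : PySem.Dict String (PySem.Set String)) : Prop :=
  pc.keys.Nodup ∧ ∀ p : String, (pc.getD p []).Nodup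

theorem pvModifyAdd_inv (pc : PySem.Dict String (PySem.Set String)) (m v : String) :
    pvInv pc → pvInv (pc.modify m [] (fun s => PySem.Set.add s v)) := by
  rintro ⟨hk, hv⟩
  constructor
  · rw [PySem.Dict.keys_modify]
    exact PySem.Dict.nodup_keys_insert _ _ _ hk
  · intro p
    rw [PySem.Dict.getD_modify]
    split_ifs with h
    · exact PySem.Set.nodup_add _ _ (hv m)
    · exact hv p

theorem pvStepA_inv (sentences : List (List String)) (k : Int)
    (wts : PySem.Dict String (PySem.Set Int))
    (pc : PySem.Dict String (PySem.Set String)) (pv : List String × List (List String)) :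
    pvInv pc → pvInv (pvStepA sentences k wts pc pv) := by
  intro h
  unfold pvStepA
  refine pvFoldPres _ pvInv _ ?_ pc h
  intro pc sidx hpc
  unfold pvAddSeqsA
  refine pvFoldPres _ pvInv _ ?_ pc hpc
  intro pc i hpc
  split_ifs with h1
  · refine pvFoldPres _ pvInv _ ?_ pc hpc
    intro pc l hpc
    split_ifs with h2
    · exact pvModifyAdd_inv _ _ _ hpc
    · exact hpc
  · exact hpc

theorem pvStepB_inv (sentences : List (List String)) (k : Int)
    (pc : PySem.Dict String (PySem.Set String)) (pv : List String × List (List String)) :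
    pvInv pc → pvInv (pvStepB sentences k pc pv) := by
  rintro ⟨hk, hv⟩
  unfold pvStepB
  constructor
  · exact PySem.Dict.nodup_keys_insert _ _ _ hk
  · intro p
    rw [PySem.Dict.getD_insert]
    split_ifs with h
    · refine pvFoldPres _ List.Nodup _ ?_ _ (hv _)
      intro cs s hcs
      split_ifs with h1 h2
      · exact hcs
      · exact hcs
      · unfold pvAddSeqsB
        refine pvFoldPres _ List.Nodup _ ?_ _ hcs
        intro cs i hcs
        refine pvFoldPres _ List.Nodup _ ?_ _ hcs
        intro cs j hcs
        exact PySem.Set.nodup_add _ _ hcs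
    · exact hv p

theorem pvFormat_congr (pc pc' : PySem.Dict String (PySem.Set String))
    (h1 : pvInv pc) (h2 : pvInv pc')
    (h : ∀ p x, x ∈ pc.getD p [] ↔ x ∈ pc'.getD p []) :
    pvFormat pc = pvFormat pc' := by
  have hmem : ∀ (d : PySem.Dict String (PySem.Set String)), d.keys.Nodup →
      ∀ q, q ∈ (PySem.List.sorted d.keys (fun x => x) false).filter
          (fun person => !(d.getD person []).isEmpty) ↔ d.getD q [] ≠ [] := by
    intro d hnd q
    rw [List.mem_filter]
    constructor
    · rintro ⟨-, hq⟩
      simpa using hq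
    · intro hq
      refine ⟨?_, by simpa using hq⟩
      rw [(PySem.List.sorted_perm _ _ _).mem_iff]
      by_contra hk
      have : d.contains q = false := by
        rw [← Bool.not_eq_true, PySem.Dict.contains_iff_mem_keys]
        exact hk
      exact hq (PySem.Dict.getD_of_not_contains _ _ this)
  have hpair : ∀ (d : PySem.Dict String (PySem.Set String)), d.keys.Nodup →
      ((PySem.List.sorted d.keys (fun x => x) false).filter
          (fun person => !(d.getD person []).isEmpty)).Pairwise (· < ·) := by
    intro d hnd
    have hs : (PySem.List.sorted d.keys (fun x => x) false).Pairwise (· ≤ ·) :=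
      PySem.List.sorted_pairwise _ _
    have hnd' : (PySem.List.sorted d.keys (fun x => x) false).Nodup :=
      (PySem.List.sorted_perm _ _ _).nodup_iff.2 hnd
    have := (hs.and hnd')
    exact ((this.imp (fun hab => lt_of_le_of_ne hab.1 hab.2)).sublist List.filter_sublist)
  set L := (PySem.List.sorted pc.keys (fun x => x) false).filter
      (fun person => !(pc.getD person []).isEmpty) with hL
  set L' := (PySem.List.sorted pc'.keys (fun x => x) false).filter
      (fun person => !(pc'.getD person []).isEmpty) with hL'
  have hPL := hpair pc h1.1
  have hPL' := hpair pc' h2.1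
  have hiff : ∀ q, q ∈ L ↔ q ∈ L' := by
    intro q
    rw [hmem pc h1.1 q, hmem pc' h2.1 q]
    constructor
    · intro hq hnil
      rcases List.exists_mem_of_ne_nil _ hq with ⟨x, hx⟩
      have := (h q x).1 hx
      simp [hnil] at this
    · intro hq hnil
      rcases List.exists_mem_of_ne_nil _ hq with ⟨x, hx⟩
      have := (h q x).2 hx
      simp [hnil] at this
  have hLeq : L = L' := by
    have hndL : L.Nodup := hPL.imp (fun hab => ne_of_lt hab)
    have hndL' : L'.Nodup := hPL'.imp (fun hab => ne_of_lt hab)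
    have hperm : L'.Perm L := (List.perm_ext_iff_of_nodup hndL' hndL).2 (fun q => (hiff q).symm)
    calc L = PySem.List.sorted L (fun x => x) false :=
              (PySem.List.sorted_eq_self_of_pairwise _ _ (hPL.imp le_of_lt)).symm
      _ = L' := PySem.List.sorted_eq_of_perm_of_pairwise_lt _ _ _ hperm hPL'
  unfold pvFormat
  rw [← hL, ← hL', hLeq]
  apply List.map_congr_left
  intro q hq
  have hqv : ∀ x, x ∈ pc.getD q [] ↔ x ∈ pc'.getD q [] := h q
  have hp : (pc.getD q []).Perm (pc'.getD q []) :=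
    (List.perm_ext_iff_of_nodup (h1.2 q) (h2.2 q)).2 hqv
  rw [PySem.List.sorted_eq_sorted_of_perm _ _ _ (fun a b hab => hab) hp]

theorem pvMain (sentences : List (List String)) (k : Int)
    (people : List (List String × List (List String))) :
    ∀ dA dB, pvInv dA → pvInv dB →
      (∀ p x, x ∈ dA.getD p [] ↔ x ∈ dB.getD p []) →
      pvFormat (people.foldl (pvStepA sentences k (pvWts sentences)) dA) =
        pvFormat (people.foldl (pvStepB sentences k) dB) := by
  induction people with
  | nil => exact fun dA dB hA hB h => pvFormat_congr dA dB hA hB h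
  | cons pv t ih =>
    intro dA dB hA hB h
    simp only [List.foldl_cons]
    refine ih _ _ (pvStepA_inv _ _ _ _ _ hA) (pvStepB_inv _ _ _ _ hB) ?_
    intro p x
    rw [pvStepA_mem, pvStepB_mem]
    exact or_congr (h p x) Iff.rfl

-- ===== VERDICT (by name: the statement is the Claim_ definition above) =====
theorem extract_contexts_spec : Claim_equal_extract_contexts := by
  intro sentences people k _
  unfold Spec_extract_contexts extract_contexts extract_contexts_alt
  exact pvMain sentences k people PySem.Dict.empty PySem.Dict.empty
    ⟨by simp [PySem.Dict.empty], fun p => by simp [PySem.Dict.getD_empty]⟩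
    ⟨by simp [PySem.Dict.empty], fun p => by simp [PySem.Dict.getD_empty]⟩
    (fun p x => by simp [PySem.Dict.getD_empty])
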